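-- pv_equiv track=rewrite | github.com/Festo-se/festo-cpx-io | src/cpx_io/utils/helpers.py | unwrap_cpxe_typecode
-- ===== SOURCE A (Python) =====
-- def unwrap_cpxe_typecode(typecode: str) -> str:
--     """Takes care of the cpx-e typecode merging more than two of the same module
--     type into a number. For example MMM will be merged to 3M while MM stays."""
--     typecode_header = typecode[:7]
--     typecode_config = typecode[7:]
--
--     if typecode_header == "60E-EP-":
--         result = ""
--         i = 0
--         while i < len(typecode_config):
--             if typecode_config[i].isdigit():
--                 num = ""
--                 while i < len(typecode_config) and typecode_config[i].isdigit():
--                     num += typecode_config[i]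
--                     i += 1
--                 result += typecode_config[i] * int(num)
--             else:
--                 result += typecode_config[i]
--             i += 1
--         return typecode_header + result
--
--     raise TypeError("Your CPX-E configuration must include the Ethernet/IP "
--                     "Busmodule to be compatible with this software")
-- ===== SOURCE B (Python) =====
-- def unwrap_cpxe_typecode(typecode: str) -> str:
--     typecode_header = typecode[:7]
--     typecode_config = typecode[7:]
--     if typecode_header != "60E-EP-":
--         raise TypeError("Your CPX-E configuration must include the Ethernet/IP "
--                         "Busmodule to be compatible with this software")
--
--     def expand(s):
--         if not s:
--             return ""
--         run = 0
--         while run < len(s) and s[run].isdigit():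
--             run += 1
--         if run == 0:
--             return s[0] + expand(s[1:])
--         return s[run] * int(s[:run]) + expand(s[run + 1:])
--
--     return typecode_header + expand(typecode_config)
-- ===== Notes on version B (the rewrite author's own statement) =====
-- stated objective: alternative
-- what changed: Replaces A's single index-driven while loop with nested digit-collection loop and string accumulator by a recursive head-decomposition of the config: each step peels one leading digit-run (or one plain character) and recurses on the remaining suffix.
import Mathlib
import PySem

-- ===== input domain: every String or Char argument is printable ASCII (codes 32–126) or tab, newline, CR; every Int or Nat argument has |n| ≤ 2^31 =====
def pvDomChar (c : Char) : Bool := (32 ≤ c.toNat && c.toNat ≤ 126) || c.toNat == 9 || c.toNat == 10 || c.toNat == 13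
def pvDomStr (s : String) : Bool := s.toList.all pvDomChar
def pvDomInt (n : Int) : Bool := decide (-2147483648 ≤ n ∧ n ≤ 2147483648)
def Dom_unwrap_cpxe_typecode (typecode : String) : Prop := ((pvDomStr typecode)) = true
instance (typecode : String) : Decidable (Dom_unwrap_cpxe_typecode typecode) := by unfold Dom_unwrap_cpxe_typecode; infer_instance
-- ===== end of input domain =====

-- B replaces A's index-driven while loop (with inner digit-collection loop and accumulator)
-- by a recursive head-decomposition of the config string; alternative structure, same cost.
-- Pre_ excludes the inputs where A raises: a header other than "60E-EP-" (TypeError) and a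
-- config ending in a digit (IndexError); B raises the same exceptions there.


-- ===== PORT A =====
-- inner while: collect the digit run starting at index i into num, return (num, next index)
def pvCollectA (cs : List Char) (i : Nat) (num : List Char) : List Char × Nat :=
  if h : i < cs.length then
    if PySem.Chars.isdigit cs[i] then pvCollectA cs (i + 1) (num ++ [cs[i]])
    else (num, i)
  else (num, i)
termination_by cs.length - i

theorem pvCollectA_le (cs : List Char) (i : Nat) (num : List Char) :
    i ≤ (pvCollectA cs i num).2 := by
  unfold pvCollectA
  split
  · split
    · exact le_trans (Nat.le_succ i) (pvCollectA_le cs (i + 1) _)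
    · exact le_refl i
  · exact le_refl i
termination_by cs.length - i

-- outer while loop of A, index i, accumulator result
def pvLoopA (cs : List Char) (i : Nat) (result : List Char) : List Char :=
  if h : i < cs.length then
    if PySem.Chars.isdigit cs[i] then
      let p := pvCollectA cs i []
      match PySem.List.pyGet? cs (p.2 : Int) with
      | none => result      -- Python raises IndexError here (config ends in digits); outside Pre_
      | some c =>
          pvLoopA cs (p.2 + 1) (result ++ PySem.List.pyRepeat [c] ((PySem.Int.ofChars? p.1).getD 0))
    else pvLoopA cs (i + 1) (result ++ [cs[i]])
  else result
termination_by cs.length + 1 - i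
decreasing_by
  · have h1 := pvCollectA_le cs i []
    omega
  · omega

def unwrap_cpxe_typecode (typecode : String) : String :=
  let typecode_header := PySem.List.slice typecode.toList none (some 7)
  let typecode_config := PySem.List.slice typecode.toList (some 7) none
  if typecode_header = "60E-EP-".toList then
    String.ofList (typecode_header ++ pvLoopA typecode_config 0 [])
  else ""  -- Python raises TypeError here; outside Pre_

-- ===== PORT B =====
-- run = number of leading digits of s (B's inner while over run)
def pvRunB (s : List Char) : Nat :=
  match s with
  | [] => 0
  | c :: rest => if PySem.Chars.isdigit c then pvRunB rest + 1 else 0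

-- B's recursive expand: one leading digit-run (or one plain char), then recurse on the suffix
def pvExpandB (s : List Char) : List Char :=
  match s with
  | [] => []
  | c :: rest =>
    let run := pvRunB (c :: rest)
    if run = 0 then c :: pvExpandB rest
    else
      match PySem.List.pyGet? (c :: rest) (run : Int) with
      | none => []          -- Python raises IndexError (s[run]) here; outside Pre_
      | some d =>
          PySem.List.pyRepeat [d] ((PySem.Int.ofChars? ((c :: rest).take run)).getD 0)
            ++ pvExpandB ((c :: rest).drop (run + 1))
termination_by s.length
decreasing_by
  all_goals simp only [List.length_cons, List.length_drop]
  all_goals omega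

def unwrap_cpxe_typecode_alt (typecode : String) : String :=
  let typecode_header := PySem.List.slice typecode.toList none (some 7)
  let typecode_config := PySem.List.slice typecode.toList (some 7) none
  if typecode_header = "60E-EP-".toList then
    String.ofList (typecode_header ++ pvExpandB typecode_config)
  else ""  -- Python raises TypeError here; outside Pre_

-- ===== PRECONDITION & SPEC =====
-- Pre_ excludes exactly the inputs where A raises: header ≠ "60E-EP-" (TypeError) and a
-- config whose last character is a digit (IndexError).
def Pre_unwrap_cpxe_typecode (typecode : String) : Prop :=
  typecode.toList.take 7 = "60E-EP-".toList ∧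
  ((typecode.toList.drop 7).getLast?.all (fun c => !PySem.Chars.isdigit c)) = true
instance (typecode : String) : Decidable (Pre_unwrap_cpxe_typecode typecode) := by
  unfold Pre_unwrap_cpxe_typecode; infer_instance

def pvWitness_unwrap_cpxe_typecode : String := "60E-EP-MLNINO3M"

def Spec_unwrap_cpxe_typecode (typecode : String) (out : String) : Prop := out = unwrap_cpxe_typecode_alt typecode
instance (typecode : String) (out : String) : Decidable (Spec_unwrap_cpxe_typecode typecode out) := by unfold Spec_unwrap_cpxe_typecode; infer_instance

-- ===== CLAIM (what is proved, stated in full; the proofs are below) =====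
def Claim_equal_unwrap_cpxe_typecode : Prop := ∀ (typecode : String), Dom_unwrap_cpxe_typecode typecode → Pre_unwrap_cpxe_typecode typecode → Spec_unwrap_cpxe_typecode typecode (unwrap_cpxe_typecode typecode)

-- ===== LEMMAS AND PROOFS =====
theorem pvRunB_eq (s : List Char) :
    pvRunB s = (s.takeWhile PySem.Chars.isdigit).length := by
  induction s with
  | nil => rfl
  | cons c rest ih =>
    simp only [pvRunB, List.takeWhile_cons]
    by_cases h : PySem.Chars.isdigit c <;> simp [h, ih]

theorem pvCollectA_eq (cs : List Char) (i : Nat) (num : List Char) :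
    pvCollectA cs i num =
      (num ++ (cs.drop i).takeWhile PySem.Chars.isdigit,
       i + ((cs.drop i).takeWhile PySem.Chars.isdigit).length) := by
  unfold pvCollectA
  split
  · rename_i h
    rw [List.drop_eq_getElem_cons h]
    by_cases hd : PySem.Chars.isdigit cs[i]
    · simp only [hd, List.takeWhile_cons]
      rw [pvCollectA_eq cs (i + 1) (num ++ [cs[i]])]
      simp [List.append_assoc]
      omega
    · simp [hd]
  · rename_i h
    rw [List.drop_eq_nil_of_le (by omega)]
    simp
termination_by cs.length - i

-- main invariant: the outer loop of A from index i equals B's expand on the suffix from i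
theorem loopA_eq_expandB (cs : List Char) (i : Nat) (result : List Char) :
    pvLoopA cs i result = result ++ pvExpandB (cs.drop i) := by
  rw [pvLoopA]
  split
  · rename_i h
    have hdrop : cs.drop i = cs[i] :: cs.drop (i + 1) := List.drop_eq_getElem_cons h
    by_cases hd : PySem.Chars.isdigit cs[i]
    · simp only [if_pos hd, pvCollectA_eq, List.nil_append, PySem.List.pyGet?_natCast]
      set t := (cs.drop i).takeWhile PySem.Chars.isdigit with ht
      have htlen : 1 ≤ t.length := by
        rw [ht, hdrop, List.takeWhile_cons, if_pos hd]; simp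
      have htake : (cs.drop i).take t.length = t := by
        rw [ht]; exact (List.prefix_iff_eq_take.mp (List.takeWhile_prefix _)).symm
      have hrun : pvRunB (cs.drop i) = t.length := by rw [pvRunB_eq, ht]
      obtain ⟨a, as, hcs⟩ : ∃ a as, cs.drop i = a :: as := ⟨_, _, hdrop⟩
      rw [hcs, pvExpandB]
      simp only [← hcs, hrun]
      rw [if_neg (by omega)]
      have hget : PySem.List.pyGet? (cs.drop i) ((t.length : Nat) : Int) = cs[i + t.length]? := by
        simp [List.getElem?_drop]
      rw [hget]
      cases hg : cs[i + t.length]? with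
      | none => simp
      | some c =>
        rw [htake, List.drop_drop]
        show pvLoopA cs (i + t.length + 1) (result ++ PySem.List.pyRepeat [c] ((PySem.Int.ofChars? t).getD 0))
            = result ++ (PySem.List.pyRepeat [c] ((PySem.Int.ofChars? t).getD 0)
                ++ pvExpandB (List.drop (i + (t.length + 1)) cs))
        rw [loopA_eq_expandB cs (i + t.length + 1)]
        have harith : i + (t.length + 1) = i + t.length + 1 := by omega
        rw [harith, List.append_assoc]
    · rw [if_neg hd]
      rw [loopA_eq_expandB cs (i + 1)]
      conv_rhs => rw [hdrop, pvExpandB]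
      have h0 : pvRunB (cs.drop i) = 0 := by
        rw [hdrop]; simp [pvRunB, hd]
      simp [h0]
  · rename_i h
    rw [List.drop_eq_nil_of_le (by omega)]
    simp [pvExpandB]
termination_by cs.length - i
decreasing_by
  all_goals omega

-- ===== VERDICT (by name: the statement is the Claim_ definition above) =====
theorem unwrap_cpxe_typecode_spec : Claim_equal_unwrap_cpxe_typecode := by
  intro typecode _ _
  unfold Spec_unwrap_cpxe_typecode unwrap_cpxe_typecode unwrap_cpxe_typecode_alt
  simp only [loopA_eq_expandB, List.drop_zero, List.nil_append]
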